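-- pv_equiv track=rewrite | github.com/mozilla/pontoon | pontoon/lib/python3.11/site-packages/sacrebleu/metrics/bleu.py | _get_closest_ref_len
-- ===== SOURCE A (Python) =====
-- from typing import List, Sequence, Optional, Dict, Any
--
-- def _get_closest_ref_len(hyp_len: int, ref_lens: List[int]) -> int:
--     """Given a hypothesis length and a list of reference lengths, returns
--     the closest reference length to be used by BLEU.
--
--     :param hyp_len: The hypothesis length.
--     :param ref_lens: A list of reference lengths.
--     :return: The closest reference length.
--     """
--     closest_diff, closest_len = -1, -1
--
--     for ref_len in ref_lens:
--         diff = abs(hyp_len - ref_len)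
--         if closest_diff == -1 or diff < closest_diff:
--             closest_diff = diff
--             closest_len = ref_len
--         elif diff == closest_diff and ref_len < closest_len:
--             closest_len = ref_len
--
--     return closest_len
-- ===== SOURCE B (Python) =====
-- def _get_closest_ref_len(hyp_len, ref_lens):
--     """Two-pass rewrite: first find the minimal absolute distance, then the
--     smallest reference length achieving it. Empty input keeps A's -1 sentinel."""
--     if not ref_lens:
--         return -1
--     best_diff = min(abs(hyp_len - r) for r in ref_lens)
--     return min(r for r in ref_lens if abs(hyp_len - r) == best_diff)
-- ===== Notes on version B (the rewrite author's own statement) =====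
-- stated objective: simpler
-- what changed: Replaces A's single running-argmin loop with explicit tie-break state by two plain passes: one min over absolute distances, then a min over the reference lengths achieving that distance.
import Mathlib
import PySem

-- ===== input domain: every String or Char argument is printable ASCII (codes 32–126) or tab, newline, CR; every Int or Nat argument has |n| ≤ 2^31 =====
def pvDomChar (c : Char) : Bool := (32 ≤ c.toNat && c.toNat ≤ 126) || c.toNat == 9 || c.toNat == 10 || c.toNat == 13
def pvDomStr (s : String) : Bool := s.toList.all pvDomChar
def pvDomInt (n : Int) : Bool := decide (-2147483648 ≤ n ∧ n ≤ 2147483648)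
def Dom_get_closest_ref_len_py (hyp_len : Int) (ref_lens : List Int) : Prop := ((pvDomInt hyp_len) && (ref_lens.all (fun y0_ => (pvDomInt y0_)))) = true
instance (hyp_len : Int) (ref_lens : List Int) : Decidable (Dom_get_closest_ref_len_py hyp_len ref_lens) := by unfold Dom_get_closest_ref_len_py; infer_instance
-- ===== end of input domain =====

-- B replaces A's single running argmin-with-tie-break loop by two plain passes (min distance, then min length at that distance); objective: simpler, same O(n) cost.


-- ===== PORT A =====
def get_closest_ref_len_py (hyp_len : Int) (ref_lens : List Int) : Int :=
  (ref_lens.foldl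
    (fun st ref_len =>
      let diff := |hyp_len - ref_len|
      if st.1 = -1 ∨ diff < st.1 then (diff, ref_len)
      else if diff = st.1 ∧ ref_len < st.2 then (st.1, ref_len)
      else st)
    ((-1 : Int), (-1 : Int))).2

-- ===== PORT B =====
-- B: guard the empty list, then two passes: min distance, then min length at that distance.
def get_closest_ref_len_py_alt (hyp_len : Int) (ref_lens : List Int) : Int :=
  if ref_lens = [] then -1
  else
    let best_diff := (PySem.List.min? (ref_lens.map (fun r => |hyp_len - r|)) (fun d => d)).getD (-1)
    (PySem.List.min? (ref_lens.filter (fun r => |hyp_len - r| == best_diff)) (fun r => r)).getD (-1)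

-- ===== PRECONDITION & SPEC =====
def Spec_get_closest_ref_len_py (hyp_len : Int) (ref_lens : List Int) (out : Int) : Prop := out = get_closest_ref_len_py_alt hyp_len ref_lens
instance (hyp_len : Int) (ref_lens : List Int) (out : Int) : Decidable (Spec_get_closest_ref_len_py hyp_len ref_lens out) := by unfold Spec_get_closest_ref_len_py; infer_instance

-- ===== CLAIM (what is proved, stated in full; the proofs are below) =====
def Claim_equal_get_closest_ref_len_py : Prop := ∀ (hyp_len : Int) (ref_lens : List Int), Dom_get_closest_ref_len_py hyp_len ref_lens → Spec_get_closest_ref_len_py hyp_len ref_lens (get_closest_ref_len_py hyp_len ref_lens)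

-- ===== LEMMAS AND PROOFS =====

-- proof-only helper: the running lexicographic (distance, value) argmin A maintains
def pvCombine (h c r : Int) : Int :=
  if |h - r| < |h - c| ∨ (|h - r| = |h - c| ∧ r < c) then r else c

def pvBest (h : Int) (c : Int) (l : List Int) : Int := l.foldl (pvCombine h) c

lemma pvA_fold (h : Int) (t : List Int) : ∀ c : Int,
    t.foldl
      (fun st r =>
        let diff := |h - r|
        if st.1 = -1 ∨ diff < st.1 then (diff, r)
        else if diff = st.1 ∧ r < st.2 then (st.1, r)
        else st)
      (|h - c|, c)
    = (|h - pvBest h c t|, pvBest h c t) := by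
  induction t with
  | nil => intro c; simp [pvBest]
  | cons r t ih =>
    intro c
    have hstep :
        (fun st r =>
          let diff := |h - r|
          if st.1 = -1 ∨ diff < st.1 then (diff, r)
          else if diff = st.1 ∧ r < st.2 then (st.1, r)
          else st) (|h - c|, c) r = (|h - pvCombine h c r|, pvCombine h c r) := by
      have h1 : (0:Int) ≤ |h - c| := abs_nonneg _
      have hne : ¬ ((|h - c|) = -1) := by omega
      simp only [pvCombine]
      by_cases h2 : |h - r| < |h - c|
      · simp [hne, h2]
      · by_cases h3 : |h - r| = |h - c| ∧ r < c
        · simp [hne, h3]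
        · simp [hne, h2, h3]
    simp only [List.foldl_cons, hstep]
    have : pvBest h c (r :: t) = pvBest h (pvCombine h c r) t := rfl
    rw [this]
    exact ih (pvCombine h c r)

lemma pvBest_mem (h : Int) (t : List Int) : ∀ c : Int, pvBest h c t ∈ c :: t := by
  induction t with
  | nil => intro c; simp [pvBest]
  | cons r t ih =>
    intro c
    have : pvBest h c (r :: t) = pvBest h (pvCombine h c r) t := rfl
    rw [this]
    have := ih (pvCombine h c r)
    by_cases hb : |h - r| < |h - c| ∨ (|h - r| = |h - c| ∧ r < c) <;>
      simp [pvCombine, hb] at this ⊢ <;> tauto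

lemma pvBest_min_diff (h : Int) (t : List Int) : ∀ c : Int, ∀ y ∈ c :: t,
    |h - pvBest h c t| ≤ |h - y| := by
  induction t with
  | nil => intro c y hy; simp at hy; simp [pvBest, hy]
  | cons r t ih =>
    intro c y hy
    simp only [List.mem_cons] at hy
    have hrw : pvBest h c (r :: t) = pvBest h (pvCombine h c r) t := rfl
    rw [hrw]
    have hc' : |h - pvCombine h c r| ≤ |h - c| ∧ |h - pvCombine h c r| ≤ |h - r| := by
      by_cases hb : |h - r| < |h - c| ∨ (|h - r| = |h - c| ∧ r < c) <;>
        simp [pvCombine, hb] <;> omega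
    have hihc := ih (pvCombine h c r) (pvCombine h c r) (by simp)
    rcases hy with rfl | rfl | hy
    · omega
    · omega
    · exact ih (pvCombine h c r) y (List.mem_cons_of_mem _ hy)

lemma pvBest_min_val (h : Int) (t : List Int) : ∀ c : Int, ∀ y ∈ c :: t,
    |h - y| = |h - pvBest h c t| → pvBest h c t ≤ y := by
  induction t with
  | nil => intro c y hy _; simp at hy; simp [pvBest, hy]
  | cons r t ih =>
    intro c y hy heq
    simp only [List.mem_cons] at hy
    have hrw : pvBest h c (r :: t) = pvBest h (pvCombine h c r) t := rfl
    rw [hrw] at heq ⊢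
    have hmd := pvBest_min_diff h t (pvCombine h c r) (pvCombine h c r) (by simp)
    rcases hy with hy | hy | hy
    · -- y = c : after subst, c is renamed to y
      subst hy
      by_cases hb : |h - r| < |h - y| ∨ (|h - r| = |h - y| ∧ r < y)
      · have hcr : pvCombine h y r = r := by simp [pvCombine, hb]
        rw [hcr] at heq hmd ⊢
        rcases hb with hb | hb
        · omega
        · have := ih r r (by simp) (by omega)
          omega
      · have hcr : pvCombine h y r = y := by simp [pvCombine, hb]
        rw [hcr] at heq ⊢
        exact ih y y (by simp) heq
    · -- y = r : after subst, r is renamed to y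
      subst hy
      by_cases hb : |h - y| < |h - c| ∨ (|h - y| = |h - c| ∧ y < c)
      · have hcr : pvCombine h c y = y := by simp [pvCombine, hb]
        rw [hcr] at heq ⊢
        exact ih y y (by simp) heq
      · push Not at hb
        have hcr : pvCombine h c y = c := by simp [pvCombine]; omega
        rw [hcr] at heq hmd ⊢
        have hcr2 : |h - c| ≤ |h - y| := by omega
        have heqc : |h - c| = |h - pvBest h c t| := by omega
        have := ih c c (by simp) heqc
        omega
    · exact ih (pvCombine h c r) y (List.mem_cons_of_mem _ hy) heq

lemma pvB_minmap (h : Int) (t : List Int) : ∀ c : Int,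
    (t.map (fun r => |h - r|)).foldl min (|h - c|) = |h - pvBest h c t| := by
  induction t with
  | nil => intro c; simp [pvBest]
  | cons r t ih =>
    intro c
    have hmin : min (|h - c|) (|h - r|) = |h - pvCombine h c r| := by
      by_cases hb : |h - r| < |h - c| ∨ (|h - r| = |h - c| ∧ r < c) <;>
        simp [pvCombine, hb] <;> omega
    have hrw : pvBest h c (r :: t) = pvBest h (pvCombine h c r) t := rfl
    simp only [List.map_cons, List.foldl_cons, hmin, hrw]
    exact ih (pvCombine h c r)

-- ===== VERDICT (by name: the statement is the Claim_ definition above) =====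
theorem get_closest_ref_len_py_spec : Claim_equal_get_closest_ref_len_py := by
  intro h l _
  unfold Spec_get_closest_ref_len_py
  cases l with
  | nil => simp [get_closest_ref_len_py, get_closest_ref_len_py_alt]
  | cons x t =>
    -- A side
    have hA : get_closest_ref_len_py h (x :: t) = pvBest h x t := by
      unfold get_closest_ref_len_py
      rw [List.foldl_cons]
      norm_num
      rw [pvA_fold h t x]
    -- B side
    have hbd : (PySem.List.min? ((x :: t).map (fun r => |h - r|)) (fun d => d)).getD (-1)
        = |h - pvBest h x t| := by
      rw [List.map_cons, PySem.List.min?_id_cons, Option.getD_some]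
      exact pvB_minmap h t x
    have hmem : pvBest h x t ∈ (x :: t).filter
        (fun r => |h - r| == |h - pvBest h x t|) := by
      rw [List.mem_filter]
      exact ⟨pvBest_mem h t x, by simp⟩
    have hB : get_closest_ref_len_py_alt h (x :: t) = pvBest h x t := by
      unfold get_closest_ref_len_py_alt
      simp only [if_neg (List.cons_ne_nil x t), hbd]
      cases hmin : PySem.List.min?
          ((x :: t).filter (fun r => |h - r| == |h - pvBest h x t|)) (fun r => r) with
      | none =>
        rw [PySem.List.min?_eq_none_iff] at hmin
        rw [hmin] at hmem
        simp at hmem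
      | some m' =>
        have hm'mem := PySem.List.min?_mem hmin
        have hle := PySem.List.min?_isMin hmin _ hmem
        rw [List.mem_filter] at hm'mem
        obtain ⟨hm'l, hm'f⟩ := hm'mem
        have hm'f' : |h - m'| = |h - pvBest h x t| := by
          simpa using hm'f
        have hge := pvBest_min_val h t x m' hm'l hm'f'
        simp only [Option.getD_some]
        omega
    rw [hA, hB]
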